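-- pv_equiv track=rewrite | github.com/firetools/blenderfds | geometry/calc_voxels.py | _grow_boxes_along_y
-- ===== SOURCE A (Python) =====
-- def _grow_boxes_along_y(boxes, sort_by):
--     """!
--     Grow boxes by merging neighbours along y axis.
--     @param boxes: the boxes to handle.
--     @param sort_by: sorting criteria.
--     @return the grown boxes.
--     """
--     # Sort boxes
--     boxes.sort(key=lambda box: (box[sort_by], box[2]))
--     # Grow boxes in -y direction, starting from last one
--     boxes_grown = list()
--     box = boxes.pop()
--     while boxes:
--         abox = boxes.pop()
--         # Check same iz0, iz1, ix0, ix1, and touching abox iy1 with box iy0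
--         if (
--             abox[4] == box[4]
--             and abox[5] == box[5]
--             and abox[0] == box[0]
--             and abox[1] == box[1]
--             and abox[3] == box[2]
--         ):
--             box[2] = abox[2]  # grow box along -y
--         else:
--             boxes_grown.append(box)  # stash the resulting box
--             box = abox  # init next cycle
--     # Stash the last one
--     boxes_grown.append(box)
--     return boxes_grown
-- ===== SOURCE B (Python) =====
-- def _grow_boxes_along_y(boxes, sort_by):
--     """Merge neighbouring boxes along y: one forward scan over a sorted copy
--     grouping maximal runs of touching boxes, then reverse the group list.
--     (Return-value equivalent to the original; unlike it, does not mutate boxes.)"""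
--     ordered = sorted(boxes, key=lambda box: (box[sort_by], box[2]))
--     groups = []
--     start = prev = ordered[0]
--     for b in ordered[1:]:
--         if (b[0] == prev[0] and b[1] == prev[1] and b[4] == prev[4]
--                 and b[5] == prev[5] and b[2] == prev[3]):
--             prev = b  # run continues upward
--         else:
--             groups.append(prev[:2] + [start[2]] + prev[3:])
--             start = prev = b
--     groups.append(prev[:2] + [start[2]] + prev[3:])
--     groups.reverse()
--     return groups
-- ===== Notes on version B (the rewrite author's own statement) =====
-- stated objective: alternative
-- what changed: Replaces the destructive sort + pop-from-the-end loop that grows a mutated current box downwards with a non-mutating forward scan over a sorted copy that groups maximal runs of touching boxes (tracking the run's start and previous box), builds each merged box once per run by slicing, and reverses the group list to reproduce the descending output order.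
import Mathlib
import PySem

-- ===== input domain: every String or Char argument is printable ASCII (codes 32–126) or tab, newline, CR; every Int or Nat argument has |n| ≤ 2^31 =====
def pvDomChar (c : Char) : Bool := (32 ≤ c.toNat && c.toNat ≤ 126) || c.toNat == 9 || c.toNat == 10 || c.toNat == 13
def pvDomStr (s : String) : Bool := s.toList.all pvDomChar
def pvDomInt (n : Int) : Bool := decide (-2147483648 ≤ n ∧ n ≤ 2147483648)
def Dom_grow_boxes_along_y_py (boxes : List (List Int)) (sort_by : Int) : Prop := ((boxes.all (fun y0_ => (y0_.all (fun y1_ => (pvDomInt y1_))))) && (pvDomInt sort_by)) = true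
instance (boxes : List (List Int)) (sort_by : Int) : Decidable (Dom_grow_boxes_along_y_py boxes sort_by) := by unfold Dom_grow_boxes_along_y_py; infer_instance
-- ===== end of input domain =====

-- B merges touching boxes in one forward scan over a sorted copy instead of A's destructive
-- pop-from-the-end loop; equivalence is about the RETURN value only (A sorts and empties the
-- `boxes` argument in place and returns mutated input boxes, B does not mutate anything).

-- ===== PORT A =====
-- the sort key (box[sort_by], box[2]); box[sort_by] may use a negative Python index.
-- (the .getD 0 on an out-of-range index is never reached inside Pre_, where Python would raise)
def pvKey1 (sort_by : Int) (box : List Int) : Int := (PySem.List.pyGet? box sort_by).getD 0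
def pvKey2 (box : List Int) : Int := box.getD 2 0

-- abox[4]==box[4] and abox[5]==box[5] and abox[0]==box[0] and abox[1]==box[1] and abox[3]==box[2]
-- literal non-negative indices on boxes of length ≥ 6 (Pre_): box[i] is getD i 0, exact there
def condA (abox box : List Int) : Bool :=
  abox.getD 4 0 == box.getD 4 0 && abox.getD 5 0 == box.getD 5 0 &&
  abox.getD 0 0 == box.getD 0 0 && abox.getD 1 0 == box.getD 1 0 &&
  abox.getD 3 0 == box.getD 2 0

-- the while loop: pop from the end of the ascending list = walk its reverse
def loopA : List (List Int) → List Int → List (List Int) → List (List Int)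
  | [], box, boxes_grown => boxes_grown ++ [box]
  | abox :: rest, box, boxes_grown =>
    if condA abox box then loopA rest (box.set 2 (abox.getD 2 0)) boxes_grown  -- box[2] = abox[2]
    else loopA rest abox (boxes_grown ++ [box])

def grow_boxes_along_y_py (boxes : List (List Int)) (sort_by : Int) : List (List Int) :=
  match (PySem.List.sorted2 boxes (pvKey1 sort_by) pvKey2).reverse with
  | [] => []  -- Python: boxes.pop() raises IndexError here (outside Pre_)
  | box :: rest => loopA rest box []

-- ===== PORT B =====
-- b[0]==prev[0] and b[1]==prev[1] and b[4]==prev[4] and b[5]==prev[5] and b[2]==prev[3]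
def condB (b prev : List Int) : Bool :=
  b.getD 0 0 == prev.getD 0 0 && b.getD 1 0 == prev.getD 1 0 &&
  b.getD 4 0 == prev.getD 4 0 && b.getD 5 0 == prev.getD 5 0 &&
  b.getD 2 0 == prev.getD 3 0

-- prev[:2] + [start[2]] + prev[3:]
def mkBox (start prev : List Int) : List Int := prev.take 2 ++ [start.getD 2 0] ++ prev.drop 3

-- the for loop over ordered[1:], carrying (start, prev, groups)
def loopB : List (List Int) → List Int → List Int → List (List Int) → List (List Int)
  | [], start, prev, groups => groups ++ [mkBox start prev]
  | b :: rest, start, prev, groups =>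
    if condB b prev then loopB rest start b groups
    else loopB rest b b (groups ++ [mkBox start prev])

def grow_boxes_along_y_py_alt (boxes : List (List Int)) (sort_by : Int) : List (List Int) :=
  match PySem.List.sorted2 boxes (pvKey1 sort_by) pvKey2 with
  | [] => []  -- Python: ordered[0] raises IndexError here (outside Pre_)
  | b0 :: rest => (loopB rest b0 b0 []).reverse

-- ===== PRECONDITION & SPEC =====
-- inputs on which Python A returns: a non-empty list of boxes with sort_by a valid Python index
-- into every box, each box long enough for the sort key (index 2), and of a shape on which the
-- merge loop's indexing cannot raise: a single box, or all boxes of length ≥ 6, or all of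
-- length ≥ 5 with pairwise-distinct values at index 4 (the loop's `and` then short-circuits at
-- the first comparison and never reaches index 5). Pre_ does not cover multi-box inputs with
-- shorter boxes on which A happens to return only because equal index-4 values never become
-- adjacent in the sorted order: whether A returns there depends on the data, not on the shape.
def Pre_grow_boxes_along_y_py (boxes : List (List Int)) (sort_by : Int) : Prop :=
  boxes ≠ [] ∧ (∀ b ∈ boxes, 3 ≤ b.length ∧ -(b.length : Int) ≤ sort_by ∧ sort_by < (b.length : Int)) ∧
    (boxes.length = 1 ∨ (∀ b ∈ boxes, 6 ≤ b.length) ∨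
      ((∀ b ∈ boxes, 5 ≤ b.length) ∧ boxes.Pairwise (fun a b => a.getD 4 0 ≠ b.getD 4 0)))
instance (boxes : List (List Int)) (sort_by : Int) : Decidable (Pre_grow_boxes_along_y_py boxes sort_by) := by unfold Pre_grow_boxes_along_y_py; infer_instance
def pvWitness_grow_boxes_along_y_py : List (List Int) × Int := ([[0, 1, 0, 1, 0, 1], [0, 1, 1, 2, 0, 1]], 0)

def Spec_grow_boxes_along_y_py (boxes : List (List Int)) (sort_by : Int) (out : List (List Int)) : Prop := out = grow_boxes_along_y_py_alt boxes sort_by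
instance (boxes : List (List Int)) (sort_by : Int) (out : List (List Int)) : Decidable (Spec_grow_boxes_along_y_py boxes sort_by out) := by unfold Spec_grow_boxes_along_y_py; infer_instance

-- ===== CLAIM (what is proved, stated in full; the proofs are below) =====
def Claim_equal_grow_boxes_along_y_py : Prop := ∀ (boxes : List (List Int)) (sort_by : Int), Dom_grow_boxes_along_y_py boxes sort_by → Pre_grow_boxes_along_y_py boxes sort_by → Spec_grow_boxes_along_y_py boxes sort_by (grow_boxes_along_y_py boxes sort_by)

-- ===== LEMMAS AND PROOFS =====

-- run decomposition of the ascending list, pairwise touching test (B's view)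
def runs : List (List Int) → List Int → List Int → List (List Int × List Int)
  | [], start, prev => [(start, prev)]
  | b :: rest, start, prev =>
    if condB b prev then runs rest start b else (start, prev) :: runs rest b b

-- run decomposition as A walks, descending: top = run's top box, last = lowest merged so far
def condD (a top last : List Int) : Bool :=
  a.getD 4 0 == top.getD 4 0 && a.getD 5 0 == top.getD 5 0 &&
  a.getD 0 0 == top.getD 0 0 && a.getD 1 0 == top.getD 1 0 &&
  a.getD 3 0 == last.getD 2 0

def runsD : List (List Int) → List Int → List Int → List (List Int × List Int)
  | [], top, last => [(last, top)]
  | a :: rest, top, last =>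
    if condD a top last then runsD rest top a else (last, top) :: runsD rest a a

-- runs of an ascending list followed by a pending run with bottom m and top t
def runsJ' : List (List Int) → List Int → List Int → List Int → List Int → List (List Int × List Int)
  | [], s, p, m, t => if condB m p then [(s, t)] else [(s, p), (m, t)]
  | b :: bs, s, p, m, t =>
    if condB b p then runsJ' bs s b m t else (s, p) :: runsJ' bs b b m t

def runsJ : List (List Int) → List Int → List Int → List (List Int × List Int)
  | [], m, t => [(m, t)]
  | c :: cs, m, t => runsJ' cs c c m t

-- the signature (indices 0,1,4,5) agrees
def sigP (m t : List Int) : Prop :=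
  m.getD 0 0 = t.getD 0 0 ∧ m.getD 1 0 = t.getD 1 0 ∧ m.getD 4 0 = t.getD 4 0 ∧ m.getD 5 0 = t.getD 5 0

theorem loopB_eq (l : List (List Int)) : ∀ start prev groups,
    loopB l start prev groups = groups ++ (runs l start prev).map (fun q => mkBox q.1 q.2) := by
  induction l with
  | nil => intro start prev groups; simp [loopB, runs]
  | cons b rest ih =>
    intro start prev groups
    by_cases h : condB b prev = true
    · simp [loopB, runs, h, ih]
    · simp [loopB, runs, h, ih]

theorem getD_set_ne (l : List Int) (v : Int) (j : Nat) (h : j ≠ 2) :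
    (l.set 2 v).getD j 0 = l.getD j 0 := by
  simp [List.getD_eq_getElem?_getD, List.getElem?_set_ne (by omega : 2 ≠ j)]

theorem getD_set_self (l : List Int) (v : Int) (h : 2 < l.length) :
    (l.set 2 v).getD 2 0 = v := by
  simp [List.getD_eq_getElem?_getD, List.getElem?_set_self (by omega : 2 < l.length)]

theorem set_getD_self (l : List Int) (h : 2 < l.length) : l.set 2 (l.getD 2 0) = l := by
  rw [List.getD_eq_getElem l 0 h]; exact List.set_getElem_self h

theorem condA_set (a top last : List Int) (htop : 2 < top.length) :
    condA a (top.set 2 (last.getD 2 0)) = condD a top last := by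
  unfold condA condD
  rw [getD_set_ne top _ 4 (by omega), getD_set_ne top _ 5 (by omega),
      getD_set_ne top _ 0 (by omega), getD_set_ne top _ 1 (by omega),
      getD_set_self top _ htop]

theorem loopA_eq (l : List (List Int)) : ∀ top last acc,
    2 < top.length → (∀ x ∈ l, 2 < x.length) →
    loopA l (top.set 2 (last.getD 2 0)) acc
      = acc ++ (runsD l top last).map (fun q => q.2.set 2 (q.1.getD 2 0)) := by
  induction l with
  | nil => intro top last acc _ _; simp [loopA, runsD]
  | cons a rest ih =>
    intro top last acc htop hlen
    have ha : 2 < a.length := hlen a (by simp)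
    have hrest : ∀ x ∈ rest, 2 < x.length := fun x hx => hlen x (by simp [hx])
    by_cases h : condD a top last = true
    · simp only [loopA, condA_set a top last htop, h, if_true, runsD]
      rw [List.set_set]
      exact ih top a acc htop hrest
    · simp only [loopA, condA_set a top last htop, h, if_false, runsD, Bool.false_eq_true]
      have := ih a a (acc ++ [top.set 2 (last.getD 2 0)]) ha hrest
      rw [set_getD_self a ha] at this
      simp only [this, List.map_cons, List.append_assoc, List.cons_append, List.nil_append]

theorem condD_eq_condB (a t m : List Int) (h : sigP m t) : condD a t m = condB m a := by
  obtain ⟨h0, h1, h4, h5⟩ := h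
  unfold condD condB
  rw [← h0, ← h1, ← h4, ← h5]
  apply Bool.eq_iff_iff.mpr
  simp only [Bool.and_eq_true, beq_iff_eq]
  constructor
  · rintro ⟨⟨⟨⟨a4, a5⟩, a0⟩, a1⟩, a3⟩; exact ⟨⟨⟨⟨a0.symm, a1.symm⟩, a4.symm⟩, a5.symm⟩, a3.symm⟩
  · rintro ⟨⟨⟨⟨a0, a1⟩, a4⟩, a5⟩, a3⟩; exact ⟨⟨⟨⟨a4.symm, a5.symm⟩, a0.symm⟩, a1.symm⟩, a3.symm⟩

theorem sigP_trans_of_condB (a m t : List Int) (hmt : sigP m t) (h : condB m a = true) :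
    sigP a t := by
  simp only [condB, Bool.and_eq_true, beq_iff_eq] at h
  obtain ⟨⟨⟨⟨a0, a1⟩, a4⟩, a5⟩, _⟩ := h
  obtain ⟨h0, h1, h4, h5⟩ := hmt
  exact ⟨a0 ▸ h0, a1 ▸ h1, a4 ▸ h4, a5 ▸ h5⟩

theorem runsJ'_snoc (ys : List (List Int)) : ∀ s p a m t,
    runsJ' (ys ++ [a]) s p m t
      = if condB m a then runsJ' ys s p a t else runsJ' ys s p a a ++ [(m, t)] := by
  induction ys with
  | nil =>
    intro s p a m t
    by_cases h1 : condB a p = true <;> by_cases h2 : condB m a = true <;>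
      simp [runsJ', h1, h2]
  | cons b bs ih =>
    intro s p a m t
    by_cases h1 : condB b p = true
    · simp [runsJ', h1, ih]
    · by_cases h2 : condB m a = true <;> simp [runsJ', h1, h2, ih]

theorem runsJ_snoc (ys : List (List Int)) (a m t : List Int) :
    runsJ (ys ++ [a]) m t
      = if condB m a then runsJ ys a t else runsJ ys a a ++ [(m, t)] := by
  cases ys with
  | nil => by_cases h : condB m a = true <;> simp [runsJ, runsJ', h]
  | cons c cs => simp [runsJ, List.cons_append, runsJ'_snoc]

theorem runsD_eq_runsJ (r : List (List Int)) : ∀ t m, sigP m t →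
    runsD r t m = (runsJ r.reverse m t).reverse := by
  induction r with
  | nil => intro t m _; simp [runsD, runsJ]
  | cons a rest ih =>
    intro t m hsig
    have hD : condD a t m = condB m a := condD_eq_condB a t m hsig
    rw [List.reverse_cons, runsJ_snoc]
    by_cases h : condB m a = true
    · have hsig' : sigP a t := sigP_trans_of_condB a m t hsig h
      simp [runsD, hD, h, ih t a hsig']
    · simp [runsD, hD, h, ih a a ⟨rfl, rfl, rfl, rfl⟩]

theorem runsJ'_eq_runs (ys : List (List Int)) : ∀ s p m,
    runsJ' ys s p m m = runs (ys ++ [m]) s p := by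
  induction ys with
  | nil =>
    intro s p m
    by_cases h : condB m p = true <;> simp [runsJ', runs, h]
  | cons b bs ih =>
    intro s p m
    by_cases h : condB b p = true <;> simp [runsJ', runs, h, ih]

theorem runs_mem (l : List (List Int)) : ∀ s p x y, (x, y) ∈ runs l s p →
    (x = s ∨ x ∈ l) ∧ (y = p ∨ y ∈ l) := by
  induction l with
  | nil => intro s p x y h; simp [runs] at h; exact ⟨Or.inl h.1, Or.inl h.2⟩
  | cons b rest ih =>
    intro s p x y h
    simp only [runs] at h
    split at h
    · rcases ih s b x y h with ⟨hx, hy⟩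
      constructor
      · rcases hx with h1 | h1
        · exact Or.inl h1
        · exact Or.inr (List.mem_cons_of_mem _ h1)
      · rcases hy with h1 | h1
        · exact Or.inr (h1 ▸ List.mem_cons_self ..)
        · exact Or.inr (List.mem_cons_of_mem _ h1)
    · rcases List.mem_cons.mp h with h1 | h1
      · simp at h1; exact ⟨Or.inl h1.1, Or.inl h1.2⟩
      · rcases ih b b x y h1 with ⟨hx, hy⟩
        constructor
        · rcases hx with h2 | h2
          · exact Or.inr (h2 ▸ List.mem_cons_self ..)
          · exact Or.inr (List.mem_cons_of_mem _ h2)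
        · rcases hy with h2 | h2
          · exact Or.inr (h2 ▸ List.mem_cons_self ..)
          · exact Or.inr (List.mem_cons_of_mem _ h2)

theorem set_eq_mkBox (s t : List Int) (h : 2 < t.length) :
    t.set 2 (s.getD 2 0) = mkBox s t := by
  unfold mkBox
  rw [List.set_eq_take_append_cons_drop, if_pos h]
  simp

-- the whole equivalence over the already-sorted non-empty list b0 :: tail
theorem core (tail : List (List Int)) (b0 : List Int)
    (hlen3 : ∀ x ∈ b0 :: tail, 3 ≤ x.length) :
    (match (b0 :: tail).reverse with
     | [] => ([] : List (List Int))
     | box :: rest => loopA rest box []) = (loopB tail b0 b0 []).reverse := by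
  cases htail : tail with
  | nil =>
    have hb0 : 2 < b0.length := by have := hlen3 b0 (by simp); omega
    have hmb : mkBox b0 b0 = b0 := by
      rw [← set_eq_mkBox b0 b0 hb0, set_getD_self b0 hb0]
    simp [loopA, loopB, hmb]
  | cons t0 ttl =>
    have hmk : ∀ q ∈ runs tail b0 b0, q.2.set 2 (q.1.getD 2 0) = mkBox q.1 q.2 := by
      intro q hq
      apply set_eq_mkBox
      have h3 : 3 ≤ q.2.length := by
        rcases (runs_mem tail b0 b0 q.1 q.2 (by simpa using hq)).2 with h | h
        · rw [h]; exact hlen3 b0 (by simp)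
        · exact hlen3 q.2 (by simp [h])
      omega
    obtain ⟨ys, lastb, hsplit⟩ : ∃ ys lastb, tail = ys ++ [lastb] :=
      ⟨tail.dropLast, tail.getLast (by rw [htail]; simp),
        (List.dropLast_append_getLast (by rw [htail]; simp)).symm⟩
    rw [← htail]
    have hrev : (b0 :: tail).reverse = lastb :: (b0 :: ys).reverse := by
      rw [hsplit]; simp
    rw [hrev]
    simp only
    have hlast : 2 < lastb.length := by
      have := hlen3 lastb (by rw [hsplit]; simp); omega
    have hmem : ∀ x ∈ (b0 :: ys).reverse, 2 < x.length := by
      intro x hx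
      rw [List.mem_reverse, List.mem_cons] at hx
      rcases hx with h | h
      · have := hlen3 x (by simp [h]); omega
      · have := hlen3 x (by rw [hsplit]; simp [h]); omega
    have hA : loopA (b0 :: ys).reverse lastb []
        = (runsD (b0 :: ys).reverse lastb lastb).map (fun q => q.2.set 2 (q.1.getD 2 0)) := by
      have h := loopA_eq (b0 :: ys).reverse lastb lastb [] hlast hmem
      rw [set_getD_self lastb hlast] at h
      simpa using h
    have hJ : runsD (b0 :: ys).reverse lastb lastb
        = (runsJ (b0 :: ys) lastb lastb).reverse := by
      have h := runsD_eq_runsJ (b0 :: ys).reverse lastb lastb ⟨rfl, rfl, rfl, rfl⟩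
      simpa using h
    have hruns : runsJ (b0 :: ys) lastb lastb = runs tail b0 b0 := by
      rw [hsplit]
      simp only [runsJ]
      exact runsJ'_eq_runs ys b0 b0 lastb
    rw [hA, hJ, hruns, List.map_reverse, loopB_eq tail b0 b0 [], List.nil_append]
    congr 1
    exact List.map_congr_left hmk

-- ===== VERDICT (by name: the statement is the Claim_ definition above) =====
theorem grow_boxes_along_y_py_spec : Claim_equal_grow_boxes_along_y_py := by
  intro boxes sort_by _ hpre
  obtain ⟨hne, hall, -⟩ := hpre
  unfold Spec_grow_boxes_along_y_py grow_boxes_along_y_py grow_boxes_along_y_py_alt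
  have hperm : (PySem.List.sorted2 boxes (pvKey1 sort_by) pvKey2).Perm boxes :=
    PySem.List.sorted2_perm ..
  cases hLc : PySem.List.sorted2 boxes (pvKey1 sort_by) pvKey2 with
  | nil =>
    rw [hLc] at hperm
    exact absurd hperm.symm.eq_nil hne
  | cons b0 tail =>
    rw [hLc] at hperm
    have hlen3 : ∀ x ∈ b0 :: tail, 3 ≤ x.length := fun x hx =>
      (hall x (hperm.mem_iff.mp hx)).1
    exact core tail b0 hlen3
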